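-- pv_equiv track=rewrite | github.com/jbdanquah2/competitive-programming | python/cellular-network.py | cellular_network
-- ===== SOURCE A (Python) =====
-- def cellular_network(n, m, cities, towers):
--
--     max_distance = 0
--     for city in cities:
--         min_distance = float('inf')
--         for tower in towers:
--             min_distance = min(min_distance, abs(city - tower))
--         max_distance = max(max_distance, min_distance)
--     return max_distance
-- ===== SOURCE B (Python) =====
-- def cellular_network(n, m, cities, towers):
--     ts = sorted(towers)
--     best = 0
--     for c in cities:
--         lo, hi = 0, len(ts)
--         while lo < hi:
--             mid = (lo + hi) // 2
--             if ts[mid] < c: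
--                 lo = mid + 1
--             else:
--                 hi = mid
--         if lo < len(ts):
--             d = ts[lo] - c
--             if lo > 0:
--                 d = min(d, c - ts[lo - 1])
--         else:
--             d = c - ts[-1]
--         best = max(best, d)
--     return best
-- ===== Notes on version B (the rewrite author's own statement) =====
-- stated objective: faster
-- what changed: B sorts the towers once and finds each city's nearest tower by binary search instead of scanning all towers per city.
-- outside the precondition, e.g. on cellular_network(1, 0, [5], []): A returns inf, B raises IndexError
import Mathlib
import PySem

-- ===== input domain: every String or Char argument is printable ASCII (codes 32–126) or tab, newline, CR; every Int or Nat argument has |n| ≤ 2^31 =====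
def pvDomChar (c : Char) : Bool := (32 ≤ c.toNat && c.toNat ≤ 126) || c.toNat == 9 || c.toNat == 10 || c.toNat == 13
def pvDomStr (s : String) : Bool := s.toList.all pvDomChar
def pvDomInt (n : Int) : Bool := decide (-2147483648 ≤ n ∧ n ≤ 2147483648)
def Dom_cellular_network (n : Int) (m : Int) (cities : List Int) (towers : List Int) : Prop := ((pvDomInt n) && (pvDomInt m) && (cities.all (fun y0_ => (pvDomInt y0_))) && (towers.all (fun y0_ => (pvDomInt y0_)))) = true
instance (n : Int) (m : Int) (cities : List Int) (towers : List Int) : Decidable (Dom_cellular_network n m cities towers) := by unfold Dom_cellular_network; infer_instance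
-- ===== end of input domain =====

-- B sorts the towers once and answers each city by binary search (O((n+m) log m) vs A's O(n*m) scan); return values proved equal on Pre_.


-- ===== PORT A =====
-- inner loop: min_distance starts at float('inf'), modelled as (none : Option Int)
def pvInnerA (city : Int) (towers : List Int) : Option Int :=
  towers.foldl (fun md tower =>
    match md with
    | none => some |city - tower|
    | some d => some (min d |city - tower|)) none

-- when towers = [] and cities ≠ [] Python returns float('inf') (not an int; excluded by Pre_); the port's .getD 0 is never reached with none inside Pre_
def cellular_network (n : Int) (m : Int) (cities : List Int) (towers : List Int) : Int :=
  (cities.foldl (fun mx city =>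
      match mx, pvInnerA city towers with
      | some x, some d => some (max x d)
      | _, _ => none) (some 0)).getD 0

-- ===== PORT B =====
-- the while-loop binary search of Source B, recursion on hi - lo
def pvLower (ts : List Int) (c : Int) (lo hi : Nat) : Nat :=
  if _h : lo < hi then
    let mid := (lo + hi) / 2
    if ts.getD mid 0 < c then pvLower ts c (mid + 1) hi
    else pvLower ts c lo mid
  else lo
termination_by hi - lo
decreasing_by all_goals omega

-- Python's ts[-1] raises IndexError on empty ts (excluded by Pre_); ported as getD (length-1) 0 there
def cellular_network_alt (n : Int) (m : Int) (cities : List Int) (towers : List Int) : Int :=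
  let ts := PySem.List.sorted towers (fun x => x) false
  cities.foldl (fun best c =>
    let lo := pvLower ts c 0 ts.length
    let d :=
      if lo < ts.length then
        let d0 := ts.getD lo 0 - c
        if 0 < lo then min d0 (c - ts.getD (lo - 1) 0) else d0
      else c - ts.getD (ts.length - 1) 0
    max best d) 0

-- ===== PRECONDITION & SPEC =====
-- Pre_ excludes towers = [] with cities ≠ []: there A returns float('inf'), not an int, and B raises IndexError
def Pre_cellular_network (n : Int) (m : Int) (cities : List Int) (towers : List Int) : Prop :=
  towers ≠ [] ∨ cities = []
instance (n : Int) (m : Int) (cities : List Int) (towers : List Int) : Decidable (Pre_cellular_network n m cities towers) := by unfold Pre_cellular_network; infer_instance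

def pvWitness_cellular_network : Int × Int × List Int × List Int := (2, 1, [3, -7], [1])

def Spec_cellular_network (n : Int) (m : Int) (cities : List Int) (towers : List Int) (out : Int) : Prop := out = cellular_network_alt n m cities towers
instance (n : Int) (m : Int) (cities : List Int) (towers : List Int) (out : Int) : Decidable (Spec_cellular_network n m cities towers out) := by unfold Spec_cellular_network; infer_instance

-- ===== CLAIM (what is proved, stated in full; the proofs are below) =====
def Claim_equal_cellular_network : Prop := ∀ (n : Int) (m : Int) (cities : List Int) (towers : List Int), Dom_cellular_network n m cities towers → Pre_cellular_network n m cities towers → Spec_cellular_network n m cities towers (cellular_network n m cities towers)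

-- ===== LEMMAS AND PROOFS =====

-- A's inner fold with a `some` accumulator is a plain min-fold
theorem pvInnerA_some (c : Int) (l : List Int) (d : Int) :
    l.foldl (fun md tower =>
      match md with
      | none => some |c - tower|
      | some d => some (min d |c - tower|)) (some d)
    = some (l.foldl (fun a t => min a |c - t|) d) := by
  induction l generalizing d with
  | nil => rfl
  | cons t ts ih => simp [List.foldl, ih]

-- A's inner loop computes the min? of the distance list
theorem pvInnerA_eq_min? (c : Int) (l : List Int) :
    pvInnerA c l = (l.map (fun t => |c - t|)).min? := by
  cases l with
  | nil => rfl
  | cons t ts =>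
    simp only [pvInnerA, List.foldl, pvInnerA_some, List.map, List.min?_cons', List.foldl_map]

-- min? is invariant under permutation
theorem min?_perm {l l' : List Int} (h : l.Perm l') : l.min? = l'.min? := by
  cases h1 : l.min? with
  | none =>
    rw [List.min?_eq_none_iff] at h1
    subst h1
    rw [show l' = [] from List.perm_nil.mp h.symm, List.min?_nil]
  | some a =>
    rw [List.min?_eq_some_iff] at h1
    symm
    rw [List.min?_eq_some_iff]
    exact ⟨h.mem_iff.mp h1.1, fun b hb => h1.2 b (h.mem_iff.mpr hb)⟩

-- sorted list: getElem monotone (via getD)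
theorem pairwise_getD_mono {ts : List Int} (hs : ts.Pairwise (· ≤ ·))
    {i j : Nat} (hij : i ≤ j) (hj : j < ts.length) :
    ts.getD i 0 ≤ ts.getD j 0 := by
  rcases Nat.eq_or_lt_of_le hij with rfl | hlt
  · rfl
  · rw [List.getD_eq_getElem ts 0 (Nat.lt_trans hlt hj), List.getD_eq_getElem ts 0 hj]
    exact List.pairwise_iff_getElem.mp hs i j _ hj hlt

-- spec of the binary-search loop
theorem pvLower_spec (ts : List Int) (c : Int) (hs : ts.Pairwise (· ≤ ·)) :
    ∀ (lo hi : Nat), lo ≤ hi → hi ≤ ts.length →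
    lo ≤ pvLower ts c lo hi ∧ pvLower ts c lo hi ≤ hi ∧
    (∀ j, lo ≤ j → j < pvLower ts c lo hi → ts.getD j 0 < c) ∧
    (∀ j, pvLower ts c lo hi ≤ j → j < hi → c ≤ ts.getD j 0) := by
  intro lo hi
  induction lo, hi using pvLower.induct ts c with
  | case1 lo hi hlt mid hmid ih =>
    intro _ hhi
    have hm : mid = (lo + hi) / 2 := rfl
    rw [pvLower, dif_pos hlt]
    rw [show ((if ts.getD ((lo+hi)/2) 0 < c then pvLower ts c ((lo+hi)/2 + 1) hi else pvLower ts c lo ((lo+hi)/2)) = pvLower ts c (mid + 1) hi) from by rw [← hm, if_pos hmid]]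
    obtain ⟨h1, h2, h3, h4⟩ := ih (by omega) hhi
    refine ⟨by omega, h2, ?_, h4⟩
    intro j hj hjr
    by_cases hj2 : mid + 1 ≤ j
    · exact h3 j hj2 hjr
    · calc ts.getD j 0 ≤ ts.getD mid 0 :=
            pairwise_getD_mono hs (by omega) (by omega)
        _ < c := hmid
  | case2 lo hi hlt mid hmid ih =>
    intro _ hhi
    have hm : mid = (lo + hi) / 2 := rfl
    rw [pvLower, dif_pos hlt]
    rw [show ((if ts.getD ((lo+hi)/2) 0 < c then pvLower ts c ((lo+hi)/2 + 1) hi else pvLower ts c lo ((lo+hi)/2)) = pvLower ts c lo mid) from by rw [← hm, if_neg hmid]]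
    obtain ⟨h1, h2, h3, h4⟩ := ih (by omega) (by omega)
    refine ⟨h1, by omega, h3, ?_⟩
    intro j hjr hj
    by_cases hj2 : j < mid
    · exact h4 j hjr hj2
    · calc c ≤ ts.getD mid 0 := not_lt.mp hmid
        _ ≤ ts.getD j 0 := pairwise_getD_mono hs (by omega) (by omega)
  | case3 lo hi hlt =>
    intro hle hhi
    rw [pvLower, dif_neg hlt]
    exact ⟨le_refl _, hle, fun j h1 h2 => by omega,
      fun j h1 h2 => by omega⟩

-- per-city value of B is the min? of the distance list over the sorted towers
theorem dval_eq_min? (ts : List Int) (c : Int) (hne : ts ≠ [])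
    (hs : ts.Pairwise (· ≤ ·)) :
    (ts.map (fun t => |c - t|)).min? =
      some (if pvLower ts c 0 ts.length < ts.length then
              (if 0 < pvLower ts c 0 ts.length then
                min (ts.getD (pvLower ts c 0 ts.length) 0 - c)
                    (c - ts.getD (pvLower ts c 0 ts.length - 1) 0)
              else ts.getD (pvLower ts c 0 ts.length) 0 - c)
            else c - ts.getD (ts.length - 1) 0) := by
  obtain ⟨-, hr_le, h3, h4⟩ := pvLower_spec ts c hs 0 ts.length (Nat.zero_le _) (le_refl _)
  set r := pvLower ts c 0 ts.length with hrdef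
  have hlen : 0 < ts.length := List.length_pos_iff.mpr hne
  have habs1 : ∀ t : Int, c ≤ t → |c - t| = t - c := fun t ht => by
    rw [abs_sub_comm]; exact abs_of_nonneg (by omega)
  have habs2 : ∀ t : Int, t < c → |c - t| = c - t := fun t ht =>
    abs_of_nonneg (by omega)
  have hmem : ∀ i, i < ts.length → ts.getD i 0 ∈ ts := fun i hi => by
    rw [List.getD_eq_getElem _ _ hi]; exact List.getElem_mem _
  rw [List.min?_eq_some_iff]
  by_cases hrL : r < ts.length
  · have hca : c ≤ ts.getD r 0 := h4 r (le_refl _) hrL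
    rw [if_pos hrL]
    by_cases hr0 : 0 < r
    · have hbc : ts.getD (r - 1) 0 < c := h3 (r - 1) (Nat.zero_le _) (by omega)
      rw [if_pos hr0]
      constructor
      · rcases min_choice (ts.getD r 0 - c) (c - ts.getD (r - 1) 0) with h | h <;> rw [h]
        · exact List.mem_map.mpr ⟨ts.getD r 0, hmem r hrL, habs1 _ hca⟩
        · exact List.mem_map.mpr ⟨ts.getD (r - 1) 0, hmem _ (by omega), habs2 _ hbc⟩
      · intro b hb
        obtain ⟨t, ht, rfl⟩ := List.mem_map.mp hb
        obtain ⟨i, hi, rfl⟩ := List.mem_iff_getElem.mp ht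
        rw [← List.getD_eq_getElem ts 0 hi]
        by_cases hir : i < r
        · rw [habs2 _ (h3 i (Nat.zero_le _) hir)]
          have := pairwise_getD_mono hs (show i ≤ r - 1 by omega) (show r - 1 < ts.length by omega)
          exact le_trans (min_le_right _ _) (by omega)
        · rw [habs1 _ (h4 i (by omega) hi)]
          have := pairwise_getD_mono hs (show r ≤ i by omega) hi
          exact le_trans (min_le_left _ _) (by omega)
    · rw [if_neg hr0]
      constructor
      · exact List.mem_map.mpr ⟨ts.getD r 0, hmem r hrL, habs1 _ hca⟩
      · intro b hb
        obtain ⟨t, ht, rfl⟩ := List.mem_map.mp hb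
        obtain ⟨i, hi, rfl⟩ := List.mem_iff_getElem.mp ht
        rw [← List.getD_eq_getElem ts 0 hi]
        rw [habs1 _ (h4 i (by omega) hi)]
        have := pairwise_getD_mono hs (show r ≤ i by omega) hi
        omega
  · rw [if_neg hrL]
    have hrL' : r = ts.length := by omega
    constructor
    · exact List.mem_map.mpr
        ⟨ts.getD (ts.length - 1) 0, hmem _ (by omega),
         habs2 _ (h3 (ts.length - 1) (Nat.zero_le _) (by omega))⟩
    · intro b hb
      obtain ⟨t, ht, rfl⟩ := List.mem_map.mp hb
      obtain ⟨i, hi, rfl⟩ := List.mem_iff_getElem.mp ht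
      rw [← List.getD_eq_getElem ts 0 hi]
      rw [habs2 _ (h3 i (Nat.zero_le _) (by omega))]
      have := pairwise_getD_mono hs (show i ≤ ts.length - 1 by omega) (by omega)
      omega

-- proof-only helper: B's per-city distance as a named function
def pvDval (ts : List Int) (c : Int) : Int :=
  if pvLower ts c 0 ts.length < ts.length then
    (if 0 < pvLower ts c 0 ts.length then
      min (ts.getD (pvLower ts c 0 ts.length) 0 - c)
          (c - ts.getD (pvLower ts c 0 ts.length - 1) 0)
    else ts.getD (pvLower ts c 0 ts.length) 0 - c)
  else c - ts.getD (ts.length - 1) 0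

theorem cellular_network_spec : Claim_equal_cellular_network := by
  intro n m cities towers _ hpre
  unfold Spec_cellular_network
  rcases hpre with htow | hcit
  · have hperm : (PySem.List.sorted towers (fun x => x) false).Perm towers :=
      PySem.List.sorted_perm towers (fun x => x) false
    have hsp : (PySem.List.sorted towers (fun x => x) false).Pairwise (· ≤ ·) :=
      PySem.List.sorted_pairwise towers (fun x => x)
    have htne : PySem.List.sorted towers (fun x => x) false ≠ [] := by
      intro h
      exact htow (List.perm_nil.mp (h ▸ hperm.symm))
    have hc : ∀ c : Int, pvInnerA c towers =
        some (pvDval (PySem.List.sorted towers (fun x => x) false) c) := by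
      intro c
      rw [pvInnerA_eq_min?, min?_perm ((hperm.map (fun t => |c - t|)).symm),
        dval_eq_min? _ c htne hsp]
      rfl
    have houter : ∀ (cs : List Int) (x : Int),
        cs.foldl (fun mx city => match mx, pvInnerA city towers with
          | some x, some d => some (max x d) | _, _ => none) (some x)
        = some (cs.foldl (fun best c =>
            max best (pvDval (PySem.List.sorted towers (fun x => x) false) c)) x) := by
      intro cs
      induction cs with
      | nil => intro x; rfl
      | cons c cs ih =>
        intro x
        rw [List.foldl_cons, List.foldl_cons, hc c]
        exact ih _
    simp only [cellular_network, cellular_network_alt, houter cities 0, Option.getD_some]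
    rfl
  · subst hcit
    rfl
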